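-- pv_equiv track=rewrite | github.com/Hishamk2/Research-Robot-2024 | testingRobot.py | getNumMajorThemes
-- ===== SOURCE A (Python) =====
-- def getNumMajorThemes(subThemes: dict):
--     """
--     Gets the number of major themes from the subthemes as defined in Appendix A (as below)
--         'Specifications': ['api', 'hr', 'os', 'lu'],
--         'Remote': ['wireless', 'cpmr'],
--         'Connections': ['internet', 'wpi', 'sc'],
--         'Coordinates': ['position', 'orientation'],
--         'Moving': ['mp', 'obstacles', 'mapping', 'SLAM'],
--         'Actuator': ['ik', 'hc', 'wc', 'mc', 'balance'],
--         'Programming': ['pointers', 'dt', 'overflow', 'list'],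
--         'Error': ['li', 'bf'],
--         'Timing': ['timing', 'multithreading', 'rg'],
--         'Incoming': ['cameras', 'vision', 'line tracking', 'sensors'],
--         'Other' : ['gs', 'bp', 'repeat', 'decoupling', 'install', 'ra', 'ros', 'rn', 'dl', 'rl', 'dc', 'distance']
--
--     Args:\n
--     subThemes:
--                 The subthemes to get the number of major themes from\n
--                 It should be a dictionary where the keys are the indices of the subthemes and the values are the subthemes
--
--     Returns:
--         dict: a dictionary where the keys are the major themes and the values are the number of times that major theme appears in the data set
--     """
--     majorThemes = {}
--     themesAndSubThemesDict = {'Specifications': ['api', 'hr', 'os', 'lu'],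
--                               'Remote': ['wireless', 'cpmr'],
--                               'Connections': ['internet', 'wpi', 'sc'],
--                               'Coordinates': ['position', 'orientation'],
--                               'Moving': ['mp', 'obstacles', 'mapping', 'SLAM'],
--                               'Actuator': ['ik', 'hc', 'wc', 'mc', 'balance'],
--                               'Programming': ['pointers', 'dt', 'overflow', 'list'],
--                               'Error': ['li', 'bf'],
--                               'Timing': ['timing', 'multithreading', 'rg'],
--                               'Incoming': ['cameras', 'vision', 'line tracking', 'sensors'],
--                               'Other' : ['gs', 'bp', 'repeat', 'decoupling', 'install', 'ra', 'ros', 'rn', 'dl', 'rl', 'dc', 'distance']}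
--     for index, subTheme in subThemes.items():
--         found = False
--         for theme in themesAndSubThemesDict.keys():
--             if subTheme in themesAndSubThemesDict[theme]:
--                 found = True
--                 if theme in majorThemes:
--                     majorThemes[theme] += 1
--                 else:
--                     majorThemes[theme] = 1
--                 break
--     return majorThemes
-- ===== SOURCE B (Python) =====
-- _MAJOR_OF_SUB = {
--     'api': 'Specifications', 'hr': 'Specifications', 'os': 'Specifications', 'lu': 'Specifications',
--     'wireless': 'Remote', 'cpmr': 'Remote',
--     'internet': 'Connections', 'wpi': 'Connections', 'sc': 'Connections',
--     'position': 'Coordinates', 'orientation': 'Coordinates',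
--     'mp': 'Moving', 'obstacles': 'Moving', 'mapping': 'Moving', 'SLAM': 'Moving',
--     'ik': 'Actuator', 'hc': 'Actuator', 'wc': 'Actuator', 'mc': 'Actuator', 'balance': 'Actuator',
--     'pointers': 'Programming', 'dt': 'Programming', 'overflow': 'Programming', 'list': 'Programming',
--     'li': 'Error', 'bf': 'Error',
--     'timing': 'Timing', 'multithreading': 'Timing', 'rg': 'Timing',
--     'cameras': 'Incoming', 'vision': 'Incoming', 'line tracking': 'Incoming', 'sensors': 'Incoming',
--     'gs': 'Other', 'bp': 'Other', 'repeat': 'Other', 'decoupling': 'Other', 'install': 'Other',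
--     'ra': 'Other', 'ros': 'Other', 'rn': 'Other', 'dl': 'Other', 'rl': 'Other', 'dc': 'Other',
--     'distance': 'Other'}
--
--
-- def getNumMajorThemes(subThemes: dict):
--     hits = [_MAJOR_OF_SUB[s] for s in subThemes.values() if s in _MAJOR_OF_SUB]
--     return {t: hits.count(t) for t in dict.fromkeys(hits)}
-- ===== Notes on version B (the rewrite author's own statement) =====
-- stated objective: simpler
-- what changed: B replaces A's per-item inner scan over the themes table and in-loop dict accumulation by three staged passes: map each value through a literal reverse-index dict, dedup the hit list with dict.fromkeys, and build the result by counting each theme.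
import Mathlib
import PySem

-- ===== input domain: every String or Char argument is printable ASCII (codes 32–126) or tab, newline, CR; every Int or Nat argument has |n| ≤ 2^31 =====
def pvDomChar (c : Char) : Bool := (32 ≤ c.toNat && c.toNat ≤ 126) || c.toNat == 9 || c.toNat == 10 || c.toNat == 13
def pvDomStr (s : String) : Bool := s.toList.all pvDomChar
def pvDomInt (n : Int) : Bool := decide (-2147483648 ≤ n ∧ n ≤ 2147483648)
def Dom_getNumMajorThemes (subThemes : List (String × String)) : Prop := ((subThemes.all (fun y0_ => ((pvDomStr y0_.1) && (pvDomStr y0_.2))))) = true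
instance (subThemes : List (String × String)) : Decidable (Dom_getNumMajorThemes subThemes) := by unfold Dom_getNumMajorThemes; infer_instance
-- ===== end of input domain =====

-- B replaces A's nested scan-and-accumulate loop by three staged passes: map each value
-- through a literal reverse index, dedup the hit list, and count each theme (objective: simpler).


-- ===== PORT A =====
def themesTableA : List (String × List String) :=
  [("Specifications", ["api", "hr", "os", "lu"]),
   ("Remote", ["wireless", "cpmr"]),
   ("Connections", ["internet", "wpi", "sc"]),
   ("Coordinates", ["position", "orientation"]),
   ("Moving", ["mp", "obstacles", "mapping", "SLAM"]),
   ("Actuator", ["ik", "hc", "wc", "mc", "balance"]),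
   ("Programming", ["pointers", "dt", "overflow", "list"]),
   ("Error", ["li", "bf"]),
   ("Timing", ["timing", "multithreading", "rg"]),
   ("Incoming", ["cameras", "vision", "line tracking", "sensors"]),
   ("Other", ["gs", "bp", "repeat", "decoupling", "install", "ra", "ros", "rn", "dl", "rl", "dc", "distance"])]

-- A's inner 'for theme in … : if subTheme in …: update; break' loop
def findAndAddA (tbl : List (String × List String)) (maj : PySem.Dict String Int) (s : String) :
    PySem.Dict String Int :=
  match tbl with
  | [] => maj
  | (t, subs) :: rest =>
    if subs.contains s then
      (if maj.contains t then maj.insert t (maj.getD t 0 + 1) else maj.insert t 1)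
    else findAndAddA rest maj s

def getNumMajorThemes (subThemes : List (String × String)) : List (String × Int) :=
  (subThemes.foldl (fun maj p => findAndAddA themesTableA maj p.2) PySem.Dict.empty).items

-- ===== PORT B =====
-- the literal reverse index _MAJOR_OF_SUB of Source B
def majorOfSub : PySem.Dict String String := PySem.Dict.ofList
  [("api", "Specifications"), ("hr", "Specifications"), ("os", "Specifications"), ("lu", "Specifications"),
   ("wireless", "Remote"), ("cpmr", "Remote"),
   ("internet", "Connections"), ("wpi", "Connections"), ("sc", "Connections"),
   ("position", "Coordinates"), ("orientation", "Coordinates"),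
   ("mp", "Moving"), ("obstacles", "Moving"), ("mapping", "Moving"), ("SLAM", "Moving"),
   ("ik", "Actuator"), ("hc", "Actuator"), ("wc", "Actuator"), ("mc", "Actuator"), ("balance", "Actuator"),
   ("pointers", "Programming"), ("dt", "Programming"), ("overflow", "Programming"), ("list", "Programming"),
   ("li", "Error"), ("bf", "Error"),
   ("timing", "Timing"), ("multithreading", "Timing"), ("rg", "Timing"),
   ("cameras", "Incoming"), ("vision", "Incoming"), ("line tracking", "Incoming"), ("sensors", "Incoming"),
   ("gs", "Other"), ("bp", "Other"), ("repeat", "Other"), ("decoupling", "Other"), ("install", "Other"),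
   ("ra", "Other"), ("ros", "Other"), ("rn", "Other"), ("dl", "Other"), ("rl", "Other"), ("dc", "Other"),
   ("distance", "Other")]

def getNumMajorThemes_alt (subThemes : List (String × String)) : List (String × Int) :=
  -- hits = [_MAJOR_OF_SUB[s] for s in subThemes.values() if s in _MAJOR_OF_SUB]
  let hits := subThemes.filterMap (fun p => majorOfSub.get? p.2)
  -- {t: hits.count(t) for t in dict.fromkeys(hits)}
  ((PySem.List.dedup hits).foldl
    (fun d t => d.insert t (hits.count t : Int)) PySem.Dict.empty).items

-- ===== PRECONDITION & SPEC =====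
def Spec_getNumMajorThemes (subThemes : List (String × String)) (out : List (String × Int)) : Prop := out = getNumMajorThemes_alt subThemes
instance (subThemes : List (String × String)) (out : List (String × Int)) : Decidable (Spec_getNumMajorThemes subThemes out) := by unfold Spec_getNumMajorThemes; infer_instance

-- ===== CLAIM =====
def Claim_equal_getNumMajorThemes : Prop := ∀ (subThemes : List (String × String)), Dom_getNumMajorThemes subThemes → Spec_getNumMajorThemes subThemes (getNumMajorThemes subThemes)

-- ===== LEMMAS AND PROOFS =====

-- first match in a constant-valued block of an association list
theorem get?_mk_block (subs : List String) (t : String) (rest : List (String × String)) (s : String) :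
    (PySem.Dict.mk (subs.map (fun x => (x, t)) ++ rest)).get? s
      = if subs.contains s then some t else (PySem.Dict.mk rest).get? s := by
  induction subs with
  | nil => simp
  | cons a as ih =>
    simp only [List.map_cons, List.cons_append, PySem.Dict.get?_mk_cons, ih, List.contains_cons]
    cases h : a == s with
    | true =>
      have ha := eq_of_beq h
      subst ha
      simp
    | false =>
      have hne : s ≠ a := fun e => by simp [e] at h
      simp [hne]

-- A's inner scan equals a lookup in the flattened reverse association list
theorem findAndAddA_eq_lookup (tbl : List (String × List String)) (maj : PySem.Dict String Int) (s : String) :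
    findAndAddA tbl maj s
      = match (PySem.Dict.mk (tbl.flatMap (fun p => p.2.map (fun x => (x, p.1))))).get? s with
        | some t => maj.insert t (maj.getD t 0 + 1)
        | none => maj := by
  induction tbl with
  | nil => rfl
  | cons p rest ih =>
    obtain ⟨t, subs⟩ := p
    rw [List.flatMap_cons, get?_mk_block]
    show (if subs.contains s then _ else findAndAddA rest maj s) = _
    cases h : subs.contains s with
    | true =>
      rw [if_pos rfl, if_pos rfl]
      by_cases hc : maj.contains t = true
      · rw [if_pos hc]
      · have hcf : maj.contains t = false := by simpa using hc
        rw [if_neg hc]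
        simp [PySem.Dict.getD_of_not_contains, hcf]
    | false =>
      rw [if_neg (by simp), if_neg (by simp)]
      exact ih

-- B's literal reverse index is exactly A's table flattened
set_option maxRecDepth 100000 in
theorem majorOfSub_eq :
    majorOfSub = PySem.Dict.mk (themesTableA.flatMap (fun p => p.2.map (fun x => (x, p.1)))) := by
  decide

theorem getNumMajorThemes_spec : Claim_equal_getNumMajorThemes := by
  unfold Claim_equal_getNumMajorThemes
  intro subThemes _
  show getNumMajorThemes subThemes = getNumMajorThemes_alt subThemes
  unfold getNumMajorThemes getNumMajorThemes_alt
  -- rewrite A's loop body as a reverse-index lookup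
  have hA : subThemes.foldl (fun maj p => findAndAddA themesTableA maj p.2) PySem.Dict.empty
      = (subThemes.filterMap (fun p => majorOfSub.get? p.2)).foldl
          (fun d t => d.insert t (d.getD t 0 + 1)) PySem.Dict.empty := by
    rw [List.foldl_filterMap]
    apply PySem.List.foldl_congr_mem
    intro maj p _
    rw [findAndAddA_eq_lookup, majorOfSub_eq]
    split <;> simp_all
  rw [hA, PySem.Dict.foldl_insert_getD_add_one_eq_counter]
  -- both sides are Counter(hits) rendered as an association list
  apply congrArg
  apply PySem.Dict.ext
  rw [PySem.Dict.items_counter,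
      PySem.Dict.items_foldl_insert_fresh _ _ _ _ (fun a _ => rfl)
        (by simp)]
  simp [PySem.List.dedup_eq_ofList]
  rfl
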